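-- pv_equiv track=rewrite | github.com/NickMenzel7/Piston | piston_core/mapping.py | map_resource_to_station
-- ===== SOURCE A (Python) =====
-- def map_resource_to_station(resource: str, rules, stations_set):
--     if resource is None:
--         return None
--     res = str(resource).strip().lower()
--     # exact matches first
--     for mtype, pattern, station in rules:
--         if mtype == 'exact' and res == pattern:
--             return station
--     # contains matches next
--     for mtype, pattern, station in rules:
--         if mtype == 'contains' and pattern in res:
--             return station
--     res_title = str(resource).strip()
--     if res_title in stations_set:
--         return res_title
--     return None
-- ===== SOURCE B (Python) =====
-- def map_resource_to_station(resource: str, rules, stations_set):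
--     if resource is None:
--         return None
--     res = str(resource).strip().lower()
--     first_contains = None
--     for mtype, pattern, station in rules:
--         if mtype == 'exact' and res == pattern:
--             return station
--         if first_contains is None and mtype == 'contains' and pattern in res:
--             first_contains = station
--     if first_contains is not None:
--         return first_contains
--     res_title = str(resource).strip()
--     if res_title in stations_set:
--         return res_title
--     return None
-- ===== Notes on version B (the rewrite author's own statement) =====
-- stated objective: alternative
-- what changed: A's two full passes over the rules (exact pass, then contains pass) are fused into a single pass that returns on an exact hit and records only the first contains hit in a variable resolved after the scan.
import Mathlib
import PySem

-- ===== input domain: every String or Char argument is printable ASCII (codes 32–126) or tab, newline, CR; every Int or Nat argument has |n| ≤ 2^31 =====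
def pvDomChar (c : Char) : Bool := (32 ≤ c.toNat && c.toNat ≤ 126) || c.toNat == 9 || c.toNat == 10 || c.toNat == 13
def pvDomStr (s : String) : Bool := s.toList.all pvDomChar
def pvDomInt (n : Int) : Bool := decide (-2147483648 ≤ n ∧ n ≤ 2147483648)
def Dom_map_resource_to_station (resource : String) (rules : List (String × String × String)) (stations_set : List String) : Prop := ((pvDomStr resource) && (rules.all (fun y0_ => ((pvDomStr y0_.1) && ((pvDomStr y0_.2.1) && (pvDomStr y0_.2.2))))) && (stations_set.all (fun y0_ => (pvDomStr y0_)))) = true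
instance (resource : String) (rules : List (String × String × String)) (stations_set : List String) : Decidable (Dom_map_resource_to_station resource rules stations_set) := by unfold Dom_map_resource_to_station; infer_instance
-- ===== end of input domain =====

-- B fuses A's two passes over the rules into one pass: an exact hit returns immediately, the first contains hit is recorded and resolved only after the full scan (alternative decomposition, same cost).
-- ===== PORT A =====
def map_resource_to_station (resource : String) (rules : List (String × String × String)) (stations_set : List String) : Option String :=
  let res := PySem.Str.lower (PySem.Str.strip resource)
  match rules.find? (fun r => r.1 == "exact" && res == r.2.1) with
  | some r => some r.2.2
  | none =>
    match rules.find? (fun r => r.1 == "contains" && PySem.Str.isIn r.2.1 res) with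
    | some r => some r.2.2
    | none =>
      let res_title := PySem.Str.strip resource
      if stations_set.contains res_title then some res_title else none

-- ===== PORT B =====
-- single pass over the rules: return on an exact hit, remember only the FIRST contains hit
def altScan (res : String) (rules : List (String × String × String)) (fc : Option String) : String ⊕ Option String :=
  match rules with
  | [] => Sum.inr fc
  | (m, p, st) :: rest =>
    if m == "exact" && res == p then Sum.inl st
    else altScan res rest (if fc == none && (m == "contains" && PySem.Str.isIn p res) then some st else fc)

def map_resource_to_station_alt (resource : String) (rules : List (String × String × String)) (stations_set : List String) : Option String :=
  let res := PySem.Str.lower (PySem.Str.strip resource)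
  match altScan res rules none with
  | Sum.inl st => some st
  | Sum.inr (some st) => some st
  | Sum.inr none =>
    let res_title := PySem.Str.strip resource
    if stations_set.contains res_title then some res_title else none

-- ===== PRECONDITION & SPEC =====
def Spec_map_resource_to_station (resource : String) (rules : List (String × String × String)) (stations_set : List String) (out : Option String) : Prop := out = map_resource_to_station_alt resource rules stations_set
instance (resource : String) (rules : List (String × String × String)) (stations_set : List String) (out : Option String) : Decidable (Spec_map_resource_to_station resource rules stations_set out) := by unfold Spec_map_resource_to_station; infer_instance

-- ===== CLAIM (what is proved, stated in full; the proofs are below) =====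
def Claim_equal_map_resource_to_station : Prop := ∀ (resource : String) (rules : List (String × String × String)) (stations_set : List String), Dom_map_resource_to_station resource rules stations_set → Spec_map_resource_to_station resource rules stations_set (map_resource_to_station resource rules stations_set)

-- ===== LEMMAS AND PROOFS =====

-- B's single scan equals: exact-find? if it hits, else fc-or-first-contains-find?
lemma altScan_eq (res : String) (rules : List (String × String × String)) (fc : Option String) :
    altScan res rules fc =
      match rules.find? (fun r => r.1 == "exact" && res == r.2.1) with
      | some r => Sum.inl r.2.2
      | none => Sum.inr (fc.or ((rules.find? (fun r => r.1 == "contains" && PySem.Str.isIn r.2.1 res)).map (·.2.2))) := by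
  induction rules generalizing fc with
  | nil => simp [altScan]
  | cons hd tl ih =>
    obtain ⟨m, p, st⟩ := hd
    simp only [altScan, List.find?, ih]
    by_cases hx : (m == "exact" && res == p) = true
    · rw [hx]; simp
    · rw [Bool.not_eq_true] at hx
      rw [hx]
      by_cases hc : (m == "contains" && PySem.Str.isIn p res) = true
      · rw [hc]
        cases fc <;>
          cases hfe : List.find? (fun r => r.1 == "exact" && res == r.2.1) tl <;> simp
      · rw [Bool.not_eq_true] at hc
        rw [hc]
        cases fc <;>
          cases hfe : List.find? (fun r => r.1 == "exact" && res == r.2.1) tl <;> simp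

-- ===== VERDICT (by name: the statement is the Claim_ definition above) =====
theorem map_resource_to_station_spec : Claim_equal_map_resource_to_station := by
  intro resource rules stations_set _
  unfold Spec_map_resource_to_station
  simp only [map_resource_to_station, map_resource_to_station_alt, altScan_eq]
  cases hx : rules.find? (fun r => r.1 == "exact" && (PySem.Str.lower (PySem.Str.strip resource)) == r.2.1) <;>
    cases hc : rules.find? (fun r => r.1 == "contains" && PySem.Str.isIn r.2.1 (PySem.Str.lower (PySem.Str.strip resource))) <;>
      simp
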